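-- pv_equiv track=rewrite | github.com/hfthair/emerald_crawler | csv2jsonl.py | has_structured_abstract
-- ===== SOURCE A (Python) =====
-- def has_structured_abstract(j):
--     ks = j['abstract_sections_names']
--     # if not [i for i in ks if i.startswith('Purpose')] or \
--     #         not [i for i in ks if i.startswith('Design')] or \
--     #         not [i for i in ks if i.startswith('Findings')] or\
--     #         not [i for i in ks if i.startswith('Originality')]:
--     #     return False
--     if 'Purpose' not in ks or \
--         'Design/methodology/approach' not in ks or \
--         'Findings' not in ks or \
--         'Originality/value' not in ks:
--         return False
--     ls = [len(i) for i in ks]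
--     if max(ls) > 100 or min(ls) < 3:
--         return False
--     return True
-- ===== SOURCE B (Python) =====
-- REQUIRED = ('Purpose', 'Design/methodology/approach', 'Findings', 'Originality/value')
--
-- def has_structured_abstract(j):
--     ks = j['abstract_sections_names']
--     found = set()
--     lengths_ok = True
--     for name in ks:
--         if name in REQUIRED:
--             found.add(name)
--         lengths_ok = lengths_ok and (3 <= len(name) <= 100)
--     return len(found) == 4 and lengths_ok
-- ===== Notes on version B (the rewrite author's own statement) =====
-- stated objective: alternative
-- what changed: Replaces A's four independent membership scans plus a separate length list with max()/min() passes by a single fused traversal that accumulates the set of required names found and a running all-lengths-in-[3,100] flag.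
-- outside the precondition, e.g. on has_structured_abstract({}): A raises KeyError, B raises KeyError
import Mathlib
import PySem

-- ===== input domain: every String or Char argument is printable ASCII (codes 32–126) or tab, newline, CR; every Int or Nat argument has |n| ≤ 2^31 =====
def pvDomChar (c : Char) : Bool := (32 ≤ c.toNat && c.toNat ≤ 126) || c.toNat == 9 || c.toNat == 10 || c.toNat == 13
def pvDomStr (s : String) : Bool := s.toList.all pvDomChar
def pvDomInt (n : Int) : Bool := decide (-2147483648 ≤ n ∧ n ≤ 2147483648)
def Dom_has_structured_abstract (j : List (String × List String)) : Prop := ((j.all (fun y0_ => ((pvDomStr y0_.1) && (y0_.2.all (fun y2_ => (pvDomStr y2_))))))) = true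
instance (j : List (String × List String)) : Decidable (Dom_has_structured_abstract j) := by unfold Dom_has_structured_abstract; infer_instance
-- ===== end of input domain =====

-- B fuses A's four membership scans, length list and max/min passes into one traversal
-- keeping a found-set and an all-lengths-in-range flag (objective: alternative, same cost).

-- ===== PORT A =====
def has_structured_abstract (j : List (String × List String)) : Bool :=
  match j.lookup "abstract_sections_names" with
  | none => false   -- KeyError in Python; excluded by Pre_
  | some ks =>
    if !(ks.contains "Purpose") || !(ks.contains "Design/methodology/approach")
        || !(ks.contains "Findings") || !(ks.contains "Originality/value") then false
    else
      let ls := ks.map (fun i => PySem.Str.len i)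
      match PySem.List.max? ls (fun x => x), PySem.List.min? ls (fun x => x) with
      | some mx, some mn => if mx > 100 || mn < 3 then false else true
      | _, _ => false   -- unreachable: ks is nonempty on this branch ("Purpose" ∈ ks)

-- ===== PORT B =====
def pvRequired : List String := ["Purpose", "Design/methodology/approach", "Findings", "Originality/value"]

def has_structured_abstract_alt (j : List (String × List String)) : Bool :=
  match j.lookup "abstract_sections_names" with
  | none => false   -- KeyError in Python; excluded by Pre_
  | some ks =>
    let st := ks.foldl (fun (st : PySem.Set String × Bool) name =>
        (if pvRequired.contains name then PySem.Set.add st.1 name else st.1,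
         st.2 && (decide (3 ≤ PySem.Str.len name) && decide (PySem.Str.len name ≤ 100))))
      (PySem.Set.empty, true)
    (PySem.Set.len st.1 == 4) && st.2

-- ===== PRECONDITION & SPEC =====
-- Pre_ excludes exactly the dicts without the key 'abstract_sections_names', on which A raises KeyError.
def Pre_has_structured_abstract (j : List (String × List String)) : Prop :=
  "abstract_sections_names" ∈ j.map Prod.fst
instance (j : List (String × List String)) : Decidable (Pre_has_structured_abstract j) := by
  unfold Pre_has_structured_abstract; infer_instance

def pvWitness_has_structured_abstract : (List (String × List String)) :=
  [("abstract_sections_names", ["Purpose", "Design/methodology/approach", "Findings", "Originality/value"])]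

def Spec_has_structured_abstract (j : List (String × List String)) (out : Bool) : Prop := out = has_structured_abstract_alt j
instance (j : List (String × List String)) (out : Bool) : Decidable (Spec_has_structured_abstract j out) := by unfold Spec_has_structured_abstract; infer_instance

-- ===== CLAIM (what is proved, stated in full; the proofs are below) =====
def Claim_equal_has_structured_abstract : Prop := ∀ (j : List (String × List String)), Dom_has_structured_abstract j → Pre_has_structured_abstract j → Spec_has_structured_abstract j (has_structured_abstract j)

-- ===== LEMMAS AND PROOFS =====

-- Pre_ guarantees the dict lookup succeeds
theorem pv_lookup_ne_none (j : List (String × List String))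
    (h : "abstract_sections_names" ∈ j.map Prod.fst) : j.lookup "abstract_sections_names" ≠ none := by
  induction j with
  | nil => simp at h
  | cons p t ih =>
    obtain ⟨k, v⟩ := p
    simp only [List.map_cons, List.mem_cons] at h
    by_cases hp : k = "abstract_sections_names"
    · have hb : ("abstract_sections_names" == k) = true := beq_iff_eq.mpr hp.symm
      simp [List.lookup_cons, hb]
    · have hb : ("abstract_sections_names" == k) = false := beq_eq_false_iff_ne.mpr (fun hh => hp hh.symm)
      simp only [List.lookup_cons, hb]
      exact ih (h.resolve_left (fun hh => hp hh.symm))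

-- the boolean accumulator loop is List.all
theorem pv_foldl_and (p : String → Bool) :
    ∀ (ks : List String) (b : Bool), ks.foldl (fun acc n => acc && p n) b = (b && ks.all p) := by
  intro ks
  induction ks with
  | nil => simp
  | cons h t ih => intro b; simp [List.foldl_cons, ih, Bool.and_assoc]

-- the conditional-add loop is Set.ofList of the filtered list
theorem pv_foldl_addIf (p : String → Bool) :
    ∀ (ks : List String) (s : PySem.Set String),
      ks.foldl (fun s n => if p n then PySem.Set.add s n else s) s
        = (ks.filter p).foldl PySem.Set.add s := by
  intro ks
  induction ks with
  | nil => simp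
  | cons h t ih =>
    intro s
    by_cases hp : p h <;> simp [List.foldl_cons, hp, ih]

-- the found-set has 4 elements iff every required name occurs in ks
theorem pv_len_four_iff (ks : List String) :
    PySem.Set.len (PySem.Set.ofList (ks.filter (fun n => pvRequired.contains n))) = 4
      ↔ ∀ r ∈ pvRequired, r ∈ ks := by
  set s : List String := PySem.Set.ofList (ks.filter (fun n => pvRequired.contains n)) with hs
  have hnodup : s.Nodup := PySem.Set.nodup_ofList _
  have hsub : ∀ x ∈ s, x ∈ pvRequired := by
    intro x hx
    rw [hs, PySem.Set.mem_ofList, List.mem_filter] at hx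
    simpa using hx.2
  have hmem : ∀ r, r ∈ pvRequired → (r ∈ s ↔ r ∈ ks) := by
    intro r hr
    rw [hs, PySem.Set.mem_ofList, List.mem_filter]
    simp [hr]
  have hsubF : s.toFinset ⊆ pvRequired.toFinset := by
    intro x hx; rw [List.mem_toFinset] at hx ⊢; exact hsub x hx
  have hcardR : pvRequired.toFinset.card = 4 := by decide
  have hcards : s.toFinset.card = s.length := List.toFinset_card_of_nodup hnodup
  have hlen : PySem.Set.len s = (s.length : Int) := rfl
  constructor
  · intro h4 r hr
    have hlen4 : s.length = 4 := by
      have := h4; rw [hlen] at this; exact_mod_cast this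
    have heq : s.toFinset = pvRequired.toFinset := by
      apply Finset.eq_of_subset_of_card_le hsubF
      rw [hcardR, hcards, hlen4]
    have : r ∈ s.toFinset := by
      rw [heq, List.mem_toFinset]; exact hr
    rw [List.mem_toFinset] at this
    exact (hmem r hr).mp this
  · intro hall
    have hsupF : pvRequired.toFinset ⊆ s.toFinset := by
      intro x hx; rw [List.mem_toFinset] at hx ⊢
      exact (hmem x hx).mpr (hall x hx)
    have heq : s.toFinset = pvRequired.toFinset := Finset.Subset.antisymm hsubF hsupF
    have : s.length = 4 := by rw [← hcards, heq, hcardR]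
    rw [hlen, this]; norm_num

-- A's max/min range test equals B's all-lengths-in-range flag (on a nonempty list)
theorem pv_range_iff (ks : List String) (mx mn : Int)
    (hmx : PySem.List.max? (ks.map (fun i => PySem.Str.len i)) (fun x => x) = some mx)
    (hmn : PySem.List.min? (ks.map (fun i => PySem.Str.len i)) (fun x => x) = some mn) :
    (mx > 100 || mn < 3) = !(ks.all (fun n => decide (3 ≤ PySem.Str.len n) && decide (PySem.Str.len n ≤ 100))) := by
  have hmxmem := PySem.List.max?_mem hmx
  have hmnmem := PySem.List.min?_mem hmn
  have hmxmax := PySem.List.max?_isMax hmx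
  have hmnmin := PySem.List.min?_isMin hmn
  by_cases hall : ∀ n ∈ ks, 3 ≤ PySem.Str.len n ∧ PySem.Str.len n ≤ 100
  · have h1 : ¬ (mx > 100) := by
      rw [List.mem_map] at hmxmem
      obtain ⟨n, hn, rfl⟩ := hmxmem
      exact not_lt.mpr (hall n hn).2
    have h2 : ¬ (mn < 3) := by
      rw [List.mem_map] at hmnmem
      obtain ⟨n, hn, rfl⟩ := hmnmem
      exact not_lt.mpr (hall n hn).1
    have hA : (ks.all (fun n => decide (3 ≤ PySem.Str.len n) && decide (PySem.Str.len n ≤ 100))) = true := by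
      rw [List.all_eq_true]; intro n hn
      simp only [Bool.and_eq_true, decide_eq_true_eq]
      exact hall n hn
    rw [hA]; simp [h1, h2]
  · push Not at hall
    obtain ⟨n, hn, hbad⟩ := hall
    have hA : (ks.all (fun n => decide (3 ≤ PySem.Str.len n) && decide (PySem.Str.len n ≤ 100))) = false := by
      rw [List.all_eq_false]
      refine ⟨n, hn, ?_⟩
      intro hcontra
      rw [Bool.and_eq_true, decide_eq_true_eq, decide_eq_true_eq] at hcontra
      exact absurd (hbad hcontra.1) (not_lt.mpr hcontra.2)
    have hor : mx > 100 ∨ mn < 3 := by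
      by_cases h3 : 3 ≤ PySem.Str.len n
      · left
        have := hmxmax (PySem.Str.len n) (List.mem_map.mpr ⟨n, hn, rfl⟩)
        have := hbad h3
        omega
      · right
        have := hmnmin (PySem.Str.len n) (List.mem_map.mpr ⟨n, hn, rfl⟩)
        omega
    rw [hA]
    rcases hor with h | h <;> simp [h]

-- core equivalence of the two bodies on the section-name list
theorem pv_core (ks : List String) :
    (if !(ks.contains "Purpose") || !(ks.contains "Design/methodology/approach")
        || !(ks.contains "Findings") || !(ks.contains "Originality/value") then false
      else
        match PySem.List.max? (ks.map (fun i => PySem.Str.len i)) (fun x => x),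
              PySem.List.min? (ks.map (fun i => PySem.Str.len i)) (fun x => x) with
        | some mx, some mn => if mx > 100 || mn < 3 then false else true
        | _, _ => false)
    = ((PySem.Set.len (ks.foldl (fun (st : PySem.Set String × Bool) name =>
          (if pvRequired.contains name then PySem.Set.add st.1 name else st.1,
           st.2 && (decide (3 ≤ PySem.Str.len name) && decide (PySem.Str.len name ≤ 100))))
          (PySem.Set.empty, true)).1 == 4)
        && (ks.foldl (fun (st : PySem.Set String × Bool) name =>
          (if pvRequired.contains name then PySem.Set.add st.1 name else st.1,
           st.2 && (decide (3 ≤ PySem.Str.len name) && decide (PySem.Str.len name ≤ 100))))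
          (PySem.Set.empty, true)).2) := by
  rw [PySem.List.foldl_prod_mk
        (f := fun s name => if pvRequired.contains name then PySem.Set.add s name else s)
        (g := fun b name => b && (decide (3 ≤ PySem.Str.len name) && decide (PySem.Str.len name ≤ 100)))]
  simp only [pv_foldl_and, pv_foldl_addIf, Bool.true_and]
  have hempty : (PySem.Set.empty : PySem.Set String) = [] := rfl
  rw [hempty, ← PySem.Set.ofList_eq_foldl]
  by_cases h4 : ∀ r ∈ pvRequired, r ∈ ks
  · have hc : ∀ r ∈ pvRequired, ks.contains r = true := by
      intro r hr; exact List.contains_iff_mem.mpr (h4 r hr)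
    have h1 := hc "Purpose" (by decide)
    have h2 := hc "Design/methodology/approach" (by decide)
    have h3 := hc "Findings" (by decide)
    have h5 := hc "Originality/value" (by decide)
    have hne : ks ≠ [] := List.ne_nil_of_mem (h4 "Purpose" (by decide))
    have hlsne : ks.map (fun i => PySem.Str.len i) ≠ [] := by
      simpa using hne
    obtain ⟨mx, hmx⟩ : ∃ mx, PySem.List.max? (ks.map (fun i => PySem.Str.len i)) (fun x => x) = some mx := by
      cases h : PySem.List.max? (ks.map (fun i => PySem.Str.len i)) (fun x => x) with
      | none => exact absurd ((PySem.List.max?_eq_none_iff _ _).mp h) hlsne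
      | some mx => exact ⟨mx, rfl⟩
    obtain ⟨mn, hmn⟩ : ∃ mn, PySem.List.min? (ks.map (fun i => PySem.Str.len i)) (fun x => x) = some mn := by
      cases h : PySem.List.min? (ks.map (fun i => PySem.Str.len i)) (fun x => x) with
      | none => exact absurd ((PySem.List.min?_eq_none_iff _ _).mp h) hlsne
      | some mn => exact ⟨mn, rfl⟩
    have hlen : (PySem.Set.len (PySem.Set.ofList (ks.filter (fun n => pvRequired.contains n))) == 4) = true := by
      simp only [beq_iff_eq]
      exact (pv_len_four_iff ks).mpr h4
    rw [h1, h2, h3, h5, hmx, hmn, hlen]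
    have := pv_range_iff ks mx mn hmx hmn
    simp only [Bool.not_true, Bool.false_or, Bool.true_and]
    rw [this]
    cases hb : ks.all (fun n => decide (3 ≤ PySem.Str.len n) && decide (PySem.Str.len n ≤ 100)) <;> simp
  · push Not at h4
    obtain ⟨r, hr, hrks⟩ := h4
    have hcf : ks.contains r = false := by
      rw [Bool.eq_false_iff]; intro hc; exact hrks (List.contains_iff_mem.mp hc)
    have hlen : (PySem.Set.len (PySem.Set.ofList (ks.filter (fun n => pvRequired.contains n))) == 4) = false := by
      rw [Bool.eq_false_iff]
      intro h
      exact hrks ((pv_len_four_iff ks).mp (beq_iff_eq.mp h) r hr)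
    rw [hlen, Bool.false_and]
    have : (!(ks.contains "Purpose") || !(ks.contains "Design/methodology/approach")
        || !(ks.contains "Findings") || !(ks.contains "Originality/value")) = true := by
      fin_cases hr <;> rw [hcf] <;> simp
    rw [this]
    rfl

-- ===== VERDICT (by name: the statement is the Claim_ definition above) =====
theorem has_structured_abstract_spec : Claim_equal_has_structured_abstract := by
  intro j _ hpre
  unfold Spec_has_structured_abstract
  unfold has_structured_abstract has_structured_abstract_alt
  cases h : j.lookup "abstract_sections_names" with
  | none => exact absurd h (pv_lookup_ne_none j hpre)
  | some ks => exact pv_core ks
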